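-- pv_equiv track=rewrite | github.com/InADyes/nlp | assignment4/em.py | getAlignments
-- ===== SOURCE A (Python) =====
-- def getAlignments(epron, jpron):
--
--     #handle base case
--     if len(epron) == 1:
--         alignment = [[(''.join(epron), ''.join(jpron))]]
--         return alignment
--
--     #recursive case
--     alignments = []
--     for i in range(min(3, len(jpron), len(epron))):
--         curr_j = ' '.join(jpron[:i + 1])
--         align = getAlignments(epron[1:],jpron[i+1:])
--         for r in align:
--             alignments += [[(epron[0], curr_j)] + r]
--     return alignments
-- ===== SOURCE B (Python) =====
-- def getAlignments(epron, jpron):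
--     # Bottom-up DP over suffix start indices: one row per epron suffix,
--     # each row indexed by jpron start index; shares subproblems A recomputes.
--     m = len(jpron)
--     row = [[] for _ in range(m + 1)]
--     slen = 0
--     for e in reversed(epron):
--         slen += 1
--         if slen == 1:
--             row = [[[(e, ''.join(jpron[ji:]))]] for ji in range(m + 1)]
--         else:
--             new = []
--             for ji in range(m + 1):
--                 acc = []
--                 for i in range(min(3, m - ji, slen)):
--                     curr = ' '.join(jpron[ji:ji + i + 1])
--                     for r in row[ji + i + 1]:
--                         acc.append([(e, curr)] + r)
--                 new.append(acc)
--             row = new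
--     return row[0]
-- ===== Notes on version B (the rewrite author's own statement) =====
-- stated objective: alternative
-- what changed: Replaced A's naive recursion on suffixes (which re-solves the same (epron-suffix, jpron-suffix) subproblems along every branch) by a bottom-up DP that fills one row of alignment lists per epron suffix, indexed by jpron start position, keeping only the previous row.
import Mathlib
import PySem

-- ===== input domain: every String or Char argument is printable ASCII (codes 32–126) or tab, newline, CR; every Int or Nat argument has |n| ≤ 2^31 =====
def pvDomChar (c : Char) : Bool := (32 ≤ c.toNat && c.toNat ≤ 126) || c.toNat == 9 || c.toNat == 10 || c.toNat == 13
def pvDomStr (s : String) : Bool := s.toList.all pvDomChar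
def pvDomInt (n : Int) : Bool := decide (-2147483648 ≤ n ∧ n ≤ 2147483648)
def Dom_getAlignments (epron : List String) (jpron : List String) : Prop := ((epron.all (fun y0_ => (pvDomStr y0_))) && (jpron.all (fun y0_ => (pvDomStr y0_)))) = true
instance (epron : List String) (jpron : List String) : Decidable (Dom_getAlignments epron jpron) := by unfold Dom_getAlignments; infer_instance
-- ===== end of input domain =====

-- B replaces A's naive suffix recursion by a bottom-up row-per-suffix DP (alternative algorithm, same values).

-- ===== PORT A =====
-- Literal port of A: recursion on epron; base case len==1, else a loop over
-- range(min(3, len(jpron), len(epron))) with an inner accumulating loop.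
-- (epron = [] falls into the recursive case with an empty range, returning [].)
def getAlignments (epron : List String) (jpron : List String) : List (List (String × String)) :=
  match epron with
  | [] => []  -- range(min(3, len(jpron), 0)) is empty: the loop body never runs
  | e :: rest =>
    if (e :: rest).length = 1 then
      [[(String.join (e :: rest), String.join jpron)]]   -- ''.join, exact for any strings
    else
      (List.range (min 3 (min jpron.length (e :: rest).length))).foldl
        (fun alignments i =>
          let curr_j := String.intercalate " " (jpron.take (i + 1))   -- ' '.join(jpron[:i+1])
          let align := getAlignments rest (jpron.drop (i + 1))
          align.foldl (fun alignments r => alignments ++ [(e, curr_j) :: r]) alignments)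
        []

-- ===== PORT B =====
-- One DP step of Source B: consume the next element of reversed(epron), turning the
-- row for the shorter epron suffix (st.1, indexed by jpron start ji) into the
-- row for the one-longer suffix; st.2 is the current suffix length minus one.
def pvAltStep (jpron : List String) (m : Nat)
    (st : List (List (List (String × String))) × Nat) (e : String) :
    List (List (List (String × String))) × Nat :=
  let slen := st.2 + 1
  if slen = 1 then
    ((List.range (m + 1)).map (fun ji => [[(e, String.join (jpron.drop ji))]]), slen)
  else
    ((List.range (m + 1)).map (fun ji =>
        (List.range (min 3 (min (m - ji) slen))).foldl
          (fun acc i =>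
            let curr := String.intercalate " " ((jpron.drop ji).take (i + 1))  -- ' '.join(jpron[ji:ji+i+1])
            (st.1.getD (ji + i + 1) []).foldl (fun acc r => acc ++ [(e, curr) :: r]) acc)
          []),
     slen)

def getAlignments_alt (epron : List String) (jpron : List String) : List (List (String × String)) :=
  let m := jpron.length
  let init : List (List (List (String × String))) := (List.range (m + 1)).map (fun _ => [])
  (epron.reverse.foldl (pvAltStep jpron m) (init, 0)).1.getD 0 []

-- ===== PRECONDITION & SPEC =====
def Spec_getAlignments (epron : List String) (jpron : List String) (out : List (List (String × String))) : Prop := out = getAlignments_alt epron jpron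
instance (epron : List String) (jpron : List String) (out : List (List (String × String))) : Decidable (Spec_getAlignments epron jpron out) := by unfold Spec_getAlignments; infer_instance

-- ===== CLAIM (what is proved, stated in full; the proofs are below) =====
def Claim_equal_getAlignments : Prop := ∀ (epron : List String) (jpron : List String), Dom_getAlignments epron jpron → Spec_getAlignments epron jpron (getAlignments epron jpron)

-- ===== LEMMAS AND PROOFS =====

theorem pv_join_singleton (e : String) : String.join [e] = e := by
  simp [String.join]

-- Invariant: after folding reversed(epron), the row holds, at index ji,
-- exactly A's answer for the pair of suffixes (epron, jpron.drop ji).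
theorem pv_row_invariant (jpron : List String) (epron : List String) :
    epron.reverse.foldl (pvAltStep jpron jpron.length)
        ((List.range (jpron.length + 1)).map (fun _ => []), 0)
      = ((List.range (jpron.length + 1)).map
           (fun ji => getAlignments epron (jpron.drop ji)), epron.length) := by
  induction epron with
  | nil =>
    simp [getAlignments]
  | cons e rest ih =>
    rw [List.reverse_cons, List.foldl_append, ih]
    simp only [List.foldl_cons, List.foldl_nil]
    cases rest with
    | nil =>
      simp only [pvAltStep, List.length_cons, List.length_nil]
      rw [if_true]
      simp only [Prod.mk.injEq]
      refine ⟨List.map_congr_left (fun ji hji => ?_), trivial⟩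
      simp [getAlignments, pv_join_singleton]
    | cons e2 rest2 =>
      simp only [pvAltStep, List.length_cons]
      rw [if_neg (by omega)]
      simp only [Prod.mk.injEq]
      refine ⟨List.map_congr_left (fun ji hji => ?_), by simp⟩
      rw [List.mem_range] at hji
      have hlen1 : (e :: e2 :: rest2).length ≠ 1 := by simp
      conv_rhs => rw [getAlignments]
      simp only [hlen1, if_false]
      have hlenj : (jpron.drop ji).length = jpron.length - ji := List.length_drop ..
      rw [hlenj]
      apply PySem.List.foldl_congr_mem
      intro acc i hi
      rw [List.mem_range] at hi
      have hidx : ji + i + 1 < jpron.length + 1 := by omega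
      rw [List.getD_eq_getElem?_getD, List.getElem?_map,
          List.getElem?_range hidx]
      simp only [Option.map_some, Option.getD_some]
      rw [List.take_drop, List.drop_drop]
      have h2 : ji + (i + 1) = ji + i + 1 := by omega
      rw [h2]

-- ===== VERDICT (by name: the statement is the Claim_ definition above) =====
theorem getAlignments_spec : Claim_equal_getAlignments := by
  intro epron jpron _
  unfold Spec_getAlignments
  simp only [getAlignments_alt]
  rw [pv_row_invariant]
  simp
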